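-- pv_equiv track=rewrite | github.com/Persper/code-analytics | detect_change.py | get_changed_functions
-- ===== SOURCE A (Python) =====
-- def get_intersected_length(a, b):
--     """
--     >>> get_intersected_length([1, 9], [2, 8])
--     7
--     >>> get_intersected_length([2, 8], [1, 9])
--     7
--     >>> get_intersected_length([1, 4], [1, 5])
--     4
--     >>> get_intersected_length([2, 10], [4, 11])
--     7
--     """
--     start = a[0] if a[0] >= b[0] else b[0]
--     end = a[1] if a[1] <= b[1] else b[1]
--     if start > end:
--         return 0
--     else:
--         return end - start + 1
--
-- def get_changed_functions(func_names, func_ranges, additions, deletions):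
--     """func_names and func_ranges are extracted from old src file,
--     so new functions are not included.
--     This function assumes func_names and func_ranges are in same order.
--     Also func_ranges are sorted.
--     """
--     info = {}
--
--     def update_info(fn, num_lines):
--         if fn in info:
--             info[fn] += num_lines
--         else:
--             info[fn] = num_lines
--
--     add_ptr, del_ptr = 0, 0
--     num_adds, num_dels = len(additions), len(deletions)
--     for fn, fr in zip(func_names, func_ranges):
--         for i in range(add_ptr, num_adds):
--             if fr[0] <= additions[i][0] <= fr[1]:
--                 update_info(fn, additions[i][1])
--                 add_ptr = i + 1
--
--         for j in range(del_ptr, num_dels):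
--             inter_length = get_intersected_length(fr, deletions[j])
--             if inter_length > 0:
--                 update_info(fn, inter_length)
--                 del_ptr = j
--
--     return info
-- ===== SOURCE B (Python) =====
-- def get_changed_functions(func_names, func_ranges, additions, deletions):
--     """Walk the functions in order; for each one, gather the hits in the
--     not-yet-consumed change lists in one shot, record a single per-function
--     subtotal, and cut the consumed prefix off each list.  An added line
--     belongs to exactly one function, so everything up to and including the
--     last hit is dropped; a deleted span can straddle into the next function,
--     so its last hit is kept for the next round."""
--     per_function = []
--     adds, dels = additions, deletions
--     for fn, (lo, hi) in zip(func_names, func_ranges):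
--         a_hits = [(i, n) for i, (line, n) in enumerate(adds) if lo <= line <= hi]
--         d_hits = [(j, ov) for j, d in enumerate(dels)
--                   if (ov := min(hi, d[1]) - max(lo, d[0]) + 1) > 0]
--         if a_hits or d_hits:
--             per_function.append((fn, sum(n for _, n in a_hits)
--                                      + sum(ov for _, ov in d_hits)))
--         if a_hits:
--             adds = adds[a_hits[-1][0] + 1:]
--         if d_hits:
--             dels = dels[d_hits[-1][0]:]
--     totals = {}
--     for fn, n in per_function:
--         totals[fn] = totals.get(fn, 0) + n
--     return totals
-- ===== Notes on version B (the rewrite author's own statement) =====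
-- stated objective: alternative
-- what changed: B replaces A's interleaved per-event dict mutation driven by absolute index pointers (range(ptr, n) rescans with update_info called once per matching change) with a gather-then-aggregate pipeline: per function it gathers the hit lists of the unconsumed suffixes in one comprehension each, records a single (name, subtotal) pair computed by sum(), cuts the consumed prefix off the suffix lists, and only at the end folds the per-function pairs into the dict; the overlap test is a min/max formula instead of the helper's branch chain.
import Mathlib
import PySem

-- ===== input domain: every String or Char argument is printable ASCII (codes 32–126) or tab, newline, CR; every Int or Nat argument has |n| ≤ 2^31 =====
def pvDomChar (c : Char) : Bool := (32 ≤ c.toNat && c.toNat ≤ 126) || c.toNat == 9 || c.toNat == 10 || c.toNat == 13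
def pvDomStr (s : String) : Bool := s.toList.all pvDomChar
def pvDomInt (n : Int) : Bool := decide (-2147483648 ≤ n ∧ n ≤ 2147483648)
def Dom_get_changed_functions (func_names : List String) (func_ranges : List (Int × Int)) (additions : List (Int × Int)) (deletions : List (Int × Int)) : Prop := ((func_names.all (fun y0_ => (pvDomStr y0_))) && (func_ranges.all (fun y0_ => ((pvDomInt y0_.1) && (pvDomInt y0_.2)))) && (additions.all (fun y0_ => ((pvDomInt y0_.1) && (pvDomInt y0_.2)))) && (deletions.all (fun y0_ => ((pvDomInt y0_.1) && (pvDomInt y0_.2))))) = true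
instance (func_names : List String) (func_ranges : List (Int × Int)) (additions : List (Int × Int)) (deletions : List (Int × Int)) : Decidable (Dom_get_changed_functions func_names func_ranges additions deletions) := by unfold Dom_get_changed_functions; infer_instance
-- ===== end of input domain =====

-- B replaces A's pointer-driven per-event dict mutation with a gather-then-aggregate
-- pipeline over shrinking suffixes (alternative decomposition, same asymptotic cost).


-- ===== PORT A =====
def get_intersected_length (a b : Int × Int) : Int :=
  let start := if a.1 ≥ b.1 then a.1 else b.1
  let end_ := if a.2 ≤ b.2 then a.2 else b.2
  if start > end_ then 0 else end_ - start + 1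

-- 'if fn in info: info[fn] += n else: info[fn] = n' (getD's default is unreachable under contains)
def update_info (info : PySem.Dict String Int) (fn : String) (num_lines : Int) : PySem.Dict String Int :=
  if info.contains fn then info.insert fn (info.getD fn 0 + num_lines) else info.insert fn num_lines

-- inner 'for i in range(add_ptr, num_adds)'; additions[i] is always in range, so getD's default is never used
def pvAAddStep (additions : List (Int × Int)) (fn : String) (fr : Int × Int)
    (st2 : PySem.Dict String Int × Nat) (i : Nat) : PySem.Dict String Int × Nat :=
  let a := additions.getD i (0, 0)
  if fr.1 ≤ a.1 ∧ a.1 ≤ fr.2 then (update_info st2.1 fn a.2, i + 1) else st2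

-- inner 'for j in range(del_ptr, num_dels)'
def pvADelStep (deletions : List (Int × Int)) (fn : String) (fr : Int × Int)
    (st2 : PySem.Dict String Int × Nat) (j : Nat) : PySem.Dict String Int × Nat :=
  let d := deletions.getD j (0, 0)
  let inter_length := get_intersected_length fr d
  if inter_length > 0 then (update_info st2.1 fn inter_length, j) else st2

-- one iteration of 'for fn, fr in zip(...)'; range(a, b) over Nats is List.range' a (b - a)
def pvAStep (additions deletions : List (Int × Int))
    (st : PySem.Dict String Int × Nat × Nat) (p : String × (Int × Int)) :
    PySem.Dict String Int × Nat × Nat :=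
  let r1 := (List.range' st.2.1 (additions.length - st.2.1)).foldl (pvAAddStep additions p.1 p.2) (st.1, st.2.1)
  let r2 := (List.range' st.2.2 (deletions.length - st.2.2)).foldl (pvADelStep deletions p.1 p.2) (r1.1, st.2.2)
  (r2.1, r1.2, r2.2)

def get_changed_functions (func_names : List String) (func_ranges : List (Int × Int)) (additions : List (Int × Int)) (deletions : List (Int × Int)) : List (String × Int) :=
  ((func_names.zip func_ranges).foldl (pvAStep additions deletions) (PySem.Dict.empty, 0, 0)).1.items

-- ===== PORT B =====
-- one iteration of B's 'for fn, (lo, hi) in zip(...)': gather the two hit lists by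
-- enumerate+filter (zipIdx starts at 0, as enumerate does), append one (fn, subtotal)
-- pair when something hit, and cut the consumed prefix; a_hits[-1] / d_hits[-1] is the
-- last element of a list that is nonempty under the guard, so getLastD's default is unreachable
def pvBStep (st : List (String × Int) × List (Int × Int) × List (Int × Int))
    (p : String × (Int × Int)) : List (String × Int) × List (Int × Int) × List (Int × Int) :=
  let fn := p.1
  let lo := p.2.1
  let hi := p.2.2
  let aHits : List (Nat × Int) :=
    ((st.2.1.zipIdx).filter (fun q => decide (lo ≤ q.1.1 ∧ q.1.1 ≤ hi))).map (fun q => (q.2, q.1.2))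
  let dHits : List (Nat × Int) :=
    ((st.2.2.zipIdx).filter (fun q => decide (min hi q.1.2 - max lo q.1.1 + 1 > 0))).map
      (fun q => (q.2, min hi q.1.2 - max lo q.1.1 + 1))
  let per := if aHits ≠ [] ∨ dHits ≠ []
    then st.1 ++ [(fn, (aHits.map (·.2)).sum + (dHits.map (·.2)).sum)] else st.1
  let adds := if aHits ≠ [] then st.2.1.drop ((aHits.getLastD (0, 0)).1 + 1) else st.2.1
  let dels := if dHits ≠ [] then st.2.2.drop ((dHits.getLastD (0, 0)).1) else st.2.2
  (per, adds, dels)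

def get_changed_functions_alt (func_names : List String) (func_ranges : List (Int × Int)) (additions : List (Int × Int)) (deletions : List (Int × Int)) : List (String × Int) :=
  let per := ((func_names.zip func_ranges).foldl pvBStep ([], additions, deletions)).1
  (per.foldl (fun (totals : PySem.Dict String Int) e => totals.insert e.1 (totals.getD e.1 0 + e.2)) PySem.Dict.empty).items

-- ===== PRECONDITION & SPEC =====
def Spec_get_changed_functions (func_names : List String) (func_ranges : List (Int × Int)) (additions : List (Int × Int)) (deletions : List (Int × Int)) (out : List (String × Int)) : Prop := out = get_changed_functions_alt func_names func_ranges additions deletions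
instance (func_names : List String) (func_ranges : List (Int × Int)) (additions : List (Int × Int)) (deletions : List (Int × Int)) (out : List (String × Int)) : Decidable (Spec_get_changed_functions func_names func_ranges additions deletions out) := by unfold Spec_get_changed_functions; infer_instance

-- ===== CLAIM (what is proved, stated in full; the proofs are below) =====
def Claim_equal_get_changed_functions : Prop := ∀ (func_names : List String) (func_ranges : List (Int × Int)) (additions : List (Int × Int)) (deletions : List (Int × Int)), Dom_get_changed_functions func_names func_ranges additions deletions → Spec_get_changed_functions func_names func_ranges additions deletions (get_changed_functions func_names func_ranges additions deletions)

-- ===== LEMMAS AND PROOFS =====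

-- the (name, lines) events one function (lo, hi) produces from the additions suffix s
def pvEvA (fn : String) (lo hi : Int) : List (Int × Int) → List (String × Int)
  | [] => []
  | a :: t => (if lo ≤ a.1 ∧ a.1 ≤ hi then [(fn, a.2)] else []) ++ pvEvA fn lo hi t

def pvAnyA (lo hi : Int) (s : List (Int × Int)) : Bool :=
  s.any (fun a => decide (lo ≤ a.1 ∧ a.1 ≤ hi))

def pvLastA (lo hi : Int) : List (Int × Int) → Nat
  | [] => 0
  | _ :: t => if pvAnyA lo hi t then pvLastA lo hi t + 1 else 0

def pvCutA (lo hi : Int) (s : List (Int × Int)) : Nat :=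
  if pvAnyA lo hi s then pvLastA lo hi s + 1 else 0

def pvEvD (fn : String) (lo hi : Int) : List (Int × Int) → List (String × Int)
  | [] => []
  | d :: t => (if min hi d.2 - max lo d.1 + 1 > 0 then [(fn, min hi d.2 - max lo d.1 + 1)] else []) ++ pvEvD fn lo hi t

def pvAnyD (lo hi : Int) (s : List (Int × Int)) : Bool :=
  s.any (fun d => decide (min hi d.2 - max lo d.1 + 1 > 0))

def pvLastD (lo hi : Int) : List (Int × Int) → Nat
  | [] => 0
  | _ :: t => if pvAnyD lo hi t then pvLastD lo hi t + 1 else 0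

def pvCutD (lo hi : Int) (s : List (Int × Int)) : Nat :=
  if pvAnyD lo hi s then pvLastD lo hi s else 0

def pvUpd (d : PySem.Dict String Int) (e : String × Int) : PySem.Dict String Int :=
  update_info d e.1 e.2

theorem pv_upd_eq (info : PySem.Dict String Int) (e : String × Int) :
    info.insert e.1 (info.getD e.1 0 + e.2) = pvUpd info e := by
  unfold pvUpd update_info
  by_cases h : info.contains e.1 = true
  · simp [h]
  · have h0 : info.getD e.1 0 = 0 :=
      PySem.Dict.getD_of_not_contains info 0 (by simpa using h)
    simp [h, h0]

theorem pv_finalfold (ev : List (String × Int)) (d : PySem.Dict String Int) :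
    ev.foldl (fun (info : PySem.Dict String Int) e => info.insert e.1 (info.getD e.1 0 + e.2)) d
      = ev.foldl pvUpd d := by
  simp only [pv_upd_eq]

theorem pv_gil (lo hi : Int) (d : Int × Int) :
    get_intersected_length (lo, hi) d = if min hi d.2 - max lo d.1 + 1 > 0 then min hi d.2 - max lo d.1 + 1 else 0 := by
  unfold get_intersected_length
  simp only [min_def, max_def]
  split_ifs <;> omega

theorem pvAnyA_cons (lo hi : Int) (a : Int × Int) (t : List (Int × Int)) :
    pvAnyA lo hi (a :: t) = (decide (lo ≤ a.1 ∧ a.1 ≤ hi) || pvAnyA lo hi t) := by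
  simp [pvAnyA]

theorem pvAnyD_cons (lo hi : Int) (d : Int × Int) (t : List (Int × Int)) :
    pvAnyD lo hi (d :: t) = (decide (min hi d.2 - max lo d.1 + 1 > 0) || pvAnyD lo hi t) := by
  simp [pvAnyD]

theorem pv_lastA_lt (lo hi : Int) (s : List (Int × Int)) (h : pvAnyA lo hi s = true) :
    pvLastA lo hi s < s.length := by
  induction s with
  | nil => simp [pvAnyA] at h
  | cons a t ih =>
    by_cases ht : pvAnyA lo hi t = true
    · simpa [pvLastA, ht] using ih ht
    · simp [pvLastA, ht]

theorem pv_lastD_lt (lo hi : Int) (s : List (Int × Int)) (h : pvAnyD lo hi s = true) :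
    pvLastD lo hi s < s.length := by
  induction s with
  | nil => simp [pvAnyD] at h
  | cons a t ih =>
    by_cases ht : pvAnyD lo hi t = true
    · simpa [pvLastD, ht] using ih ht
    · simp [pvLastD, ht]

theorem pv_A_add (L : List (Int × Int)) (fn : String) (lo hi : Int) :
    ∀ (s : List (Int × Int)) (p q : Nat) (info : PySem.Dict String Int),
      L.drop p = s → p ≤ L.length →
      (List.range' p (L.length - p)).foldl (pvAAddStep L fn (lo, hi)) (info, q)
        = ((pvEvA fn lo hi s).foldl pvUpd info,
           if pvAnyA lo hi s then p + pvLastA lo hi s + 1 else q) := by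
  intro s
  induction s with
  | nil =>
    intro p q info hdrop hp
    have h0 : L.length - p = 0 := by
      have := congrArg List.length hdrop; simp at this; omega
    simp [h0, pvEvA, pvAnyA]
  | cons a t ih =>
    intro p q info hdrop hp
    have hlen : L.length - p = t.length + 1 := by
      have := congrArg List.length hdrop; simp at this; omega
    have hget : L[p]? = some a := by
      have h2 : (L.drop p)[0]? = some a := by rw [hdrop]; rfl
      simpa [List.getElem?_drop] using h2
    have hdrop' : L.drop (p + 1) = t := by
      rw [← List.tail_drop, hdrop]; rfl
    have hlen' : t.length = L.length - (p + 1) := by omega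
    have hstep : pvAAddStep L fn (lo, hi) (info, q) p
        = if lo ≤ a.1 ∧ a.1 ≤ hi then (update_info info fn a.2, p + 1) else (info, q) := by
      simp [pvAAddStep, List.getD_eq_getElem?_getD, hget]
    rw [hlen, List.range'_succ, List.foldl_cons, hstep]
    by_cases h : lo ≤ a.1 ∧ a.1 ≤ hi
    · rw [if_pos h, hlen', ih (p+1) (p+1) _ hdrop' (by omega)]
      by_cases ht : pvAnyA lo hi t = true <;>
        simp [h, ht, pvEvA, pvLastA, pvAnyA_cons, pvUpd, Prod.ext_iff]
      omega
    · rw [if_neg h, hlen', ih (p+1) q _ hdrop' (by omega)]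
      by_cases ht : pvAnyA lo hi t = true <;>
        simp [h, ht, pvEvA, pvLastA, pvAnyA_cons, Prod.ext_iff]
      omega

theorem pv_A_del (L : List (Int × Int)) (fn : String) (lo hi : Int) :
    ∀ (s : List (Int × Int)) (p q : Nat) (info : PySem.Dict String Int),
      L.drop p = s → p ≤ L.length →
      (List.range' p (L.length - p)).foldl (pvADelStep L fn (lo, hi)) (info, q)
        = ((pvEvD fn lo hi s).foldl pvUpd info,
           if pvAnyD lo hi s then p + pvLastD lo hi s else q) := by
  intro s
  induction s with
  | nil =>
    intro p q info hdrop hp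
    have h0 : L.length - p = 0 := by
      have := congrArg List.length hdrop; simp at this; omega
    simp [h0, pvEvD, pvAnyD]
  | cons a t ih =>
    intro p q info hdrop hp
    have hlen : L.length - p = t.length + 1 := by
      have := congrArg List.length hdrop; simp at this; omega
    have hget : L[p]? = some a := by
      have h2 : (L.drop p)[0]? = some a := by rw [hdrop]; rfl
      simpa [List.getElem?_drop] using h2
    have hdrop' : L.drop (p + 1) = t := by
      rw [← List.tail_drop, hdrop]; rfl
    have hlen' : t.length = L.length - (p + 1) := by omega
    have hstep : pvADelStep L fn (lo, hi) (info, q) p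
        = if min hi a.2 - max lo a.1 + 1 > 0
            then (update_info info fn (min hi a.2 - max lo a.1 + 1), p) else (info, q) := by
      simp only [pvADelStep, List.getD_eq_getElem?_getD, hget, Option.getD_some, pv_gil]
      by_cases h : min hi a.2 - max lo a.1 + 1 > 0 <;> simp [h]
    rw [hlen, List.range'_succ, List.foldl_cons, hstep]
    by_cases h : min hi a.2 - max lo a.1 + 1 > 0
    · rw [if_pos h, hlen', ih (p+1) p _ hdrop' (by omega)]
      by_cases ht : pvAnyD lo hi t = true <;>
        simp [h, ht, pvEvD, pvLastD, pvAnyD_cons, pvUpd, Prod.ext_iff]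
      omega
    · rw [if_neg h, hlen', ih (p+1) q _ hdrop' (by omega)]
      by_cases ht : pvAnyD lo hi t = true <;>
        simp [h, ht, pvEvD, pvLastD, pvAnyD_cons, Prod.ext_iff]
      omega

-- recursive characterization of B's enumerate+filter hit lists, with offset k
def pvHA (lo hi : Int) (k : Nat) : List (Int × Int) → List (Nat × Int)
  | [] => []
  | a :: t => (if lo ≤ a.1 ∧ a.1 ≤ hi then [(k, a.2)] else []) ++ pvHA lo hi (k+1) t

def pvHD (lo hi : Int) (k : Nat) : List (Int × Int) → List (Nat × Int)
  | [] => []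
  | d :: t => (if min hi d.2 - max lo d.1 + 1 > 0 then [(k, min hi d.2 - max lo d.1 + 1)] else []) ++ pvHD lo hi (k+1) t

theorem pv_hitsA_eq (lo hi : Int) :
    ∀ (s : List (Int × Int)) (k : Nat),
      ((s.zipIdx k).filter (fun q => decide (lo ≤ q.1.1 ∧ q.1.1 ≤ hi))).map (fun q => (q.2, q.1.2))
        = pvHA lo hi k s := by
  intro s
  induction s with
  | nil => intro k; simp [pvHA]
  | cons a t ih =>
    intro k
    rw [List.zipIdx_cons, List.filter_cons]
    by_cases h : lo ≤ a.1 ∧ a.1 ≤ hi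
    · rw [if_pos (by simpa using h), List.map_cons, ih, pvHA]
      simp [h]
    · rw [if_neg (by simpa using h), ih, pvHA]
      simp [h]

theorem pv_hitsD_eq (lo hi : Int) :
    ∀ (s : List (Int × Int)) (k : Nat),
      ((s.zipIdx k).filter (fun q => decide (min hi q.1.2 - max lo q.1.1 + 1 > 0))).map
          (fun q => (q.2, min hi q.1.2 - max lo q.1.1 + 1))
        = pvHD lo hi k s := by
  intro s
  induction s with
  | nil => intro k; simp [pvHD]
  | cons a t ih =>
    intro k
    rw [List.zipIdx_cons, List.filter_cons]
    by_cases h : min hi a.2 - max lo a.1 + 1 > 0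
    · rw [if_pos (by simpa using h), List.map_cons, ih, pvHD]
      simp [h]
    · rw [if_neg (by simpa using h), ih, pvHD]
      simp [h]

theorem pvHA_eq_nil (lo hi : Int) :
    ∀ (s : List (Int × Int)) (k : Nat), (pvHA lo hi k s = []) ↔ pvAnyA lo hi s = false := by
  intro s
  induction s with
  | nil => intro k; simp [pvHA, pvAnyA]
  | cons a t ih =>
    intro k
    by_cases h : lo ≤ a.1 ∧ a.1 ≤ hi <;> simp [pvHA, h, pvAnyA_cons, ih]

theorem pvHD_eq_nil (lo hi : Int) :
    ∀ (s : List (Int × Int)) (k : Nat), (pvHD lo hi k s = []) ↔ pvAnyD lo hi s = false := by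
  intro s
  induction s with
  | nil => intro k; simp [pvHD, pvAnyD]
  | cons a t ih =>
    intro k
    by_cases h : min hi a.2 - max lo a.1 + 1 > 0 <;> simp [pvHD, h, pvAnyD_cons, ih]

theorem pvHA_snd (fn : String) (lo hi : Int) :
    ∀ (s : List (Int × Int)) (k : Nat),
      (pvHA lo hi k s).map (·.2) = (pvEvA fn lo hi s).map (·.2) := by
  intro s
  induction s with
  | nil => intro k; simp [pvHA, pvEvA]
  | cons a t ih =>
    intro k
    by_cases h : lo ≤ a.1 ∧ a.1 ≤ hi <;> simp [pvHA, pvEvA, h, ih]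

theorem pvHD_snd (fn : String) (lo hi : Int) :
    ∀ (s : List (Int × Int)) (k : Nat),
      (pvHD lo hi k s).map (·.2) = (pvEvD fn lo hi s).map (·.2) := by
  intro s
  induction s with
  | nil => intro k; simp [pvHD, pvEvD]
  | cons a t ih =>
    intro k
    by_cases h : min hi a.2 - max lo a.1 + 1 > 0 <;> simp [pvHD, pvEvD, h, ih]

theorem pvHA_last (lo hi : Int) :
    ∀ (s : List (Int × Int)) (k : Nat), pvAnyA lo hi s = true →
      ((pvHA lo hi k s).getLastD (0, 0)).1 = k + pvLastA lo hi s := by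
  intro s
  induction s with
  | nil => intro k h; simp [pvAnyA] at h
  | cons a t ih =>
    intro k h
    by_cases ht : pvAnyA lo hi t = true
    · have hne : pvHA lo hi (k+1) t ≠ [] := by
        intro hx; rw [pvHA_eq_nil] at hx; simp [ht] at hx
      have h1 : (pvHA lo hi k (a :: t)).getLastD (0, 0) = (pvHA lo hi (k+1) t).getLastD (0, 0) := by
        simp only [pvHA, List.getLastD_eq_getLast?, List.getLast?_append_of_ne_nil _ hne]
      rw [h1, ih (k+1) ht]
      simp only [pvLastA, ht, if_pos]
      omega
    · have hnil : pvHA lo hi (k+1) t = [] := by rw [pvHA_eq_nil]; simpa using ht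
      have ha : lo ≤ a.1 ∧ a.1 ≤ hi := by
        rw [pvAnyA_cons] at h; simp [ht] at h; exact h
      simp [pvHA, pvLastA, ha, ht, hnil]

theorem pvHD_last (lo hi : Int) :
    ∀ (s : List (Int × Int)) (k : Nat), pvAnyD lo hi s = true →
      ((pvHD lo hi k s).getLastD (0, 0)).1 = k + pvLastD lo hi s := by
  intro s
  induction s with
  | nil => intro k h; simp [pvAnyD] at h
  | cons a t ih =>
    intro k h
    by_cases ht : pvAnyD lo hi t = true
    · have hne : pvHD lo hi (k+1) t ≠ [] := by
        intro hx; rw [pvHD_eq_nil] at hx; simp [ht] at hx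
      have h1 : (pvHD lo hi k (a :: t)).getLastD (0, 0) = (pvHD lo hi (k+1) t).getLastD (0, 0) := by
        simp only [pvHD, List.getLastD_eq_getLast?, List.getLast?_append_of_ne_nil _ hne]
      rw [h1, ih (k+1) ht]
      simp only [pvLastD, ht, if_pos]
      omega
    · have hnil : pvHD lo hi (k+1) t = [] := by rw [pvHD_eq_nil]; simpa using ht
      have ha : min hi a.2 - max lo a.1 + 1 > 0 := by
        rw [pvAnyD_cons] at h; simp [ht] at h; omega
      simp [pvHD, pvLastD, ha, ht, hnil]

-- two updates at the same key collapse into one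
theorem pv_upd_upd (d : PySem.Dict String Int) (fn : String) (a b : Int) :
    pvUpd (pvUpd d (fn, a)) (fn, b) = pvUpd d (fn, a + b) := by
  rw [← pv_upd_eq d (fn, a), ← pv_upd_eq _ (fn, b), ← pv_upd_eq d (fn, a + b)]
  rw [PySem.Dict.getD_insert_self, PySem.Dict.insert_insert_self]
  ring_nf

-- the keys of the per-function event lists are all fn
theorem pvEvA_keys (fn : String) (lo hi : Int) :
    ∀ (s : List (Int × Int)), ∀ e ∈ pvEvA fn lo hi s, e.1 = fn := by
  intro s
  induction s with
  | nil => simp [pvEvA]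
  | cons a t ih =>
    intro e he
    simp only [pvEvA, List.mem_append] at he
    rcases he with he | he
    · by_cases h : lo ≤ a.1 ∧ a.1 ≤ hi <;> simp [h] at he
      simp [he]
    · exact ih e he

theorem pvEvD_keys (fn : String) (lo hi : Int) :
    ∀ (s : List (Int × Int)), ∀ e ∈ pvEvD fn lo hi s, e.1 = fn := by
  intro s
  induction s with
  | nil => simp [pvEvD]
  | cons a t ih =>
    intro e he
    simp only [pvEvD, List.mem_append] at he
    rcases he with he | he
    · by_cases h : min hi a.2 - max lo a.1 + 1 > 0 <;> simp [h] at he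
      simp [he]
    · exact ih e he

-- a nonempty fold of updates all at key fn is a single update with the sum
theorem pv_fold_same_key (fn : String) :
    ∀ (ev : List (String × Int)) (d : PySem.Dict String Int),
      (∀ e ∈ ev, e.1 = fn) → ev ≠ [] →
      ev.foldl pvUpd d = pvUpd d (fn, (ev.map (·.2)).sum) := by
  intro ev
  induction ev with
  | nil => intro d _ hne; exact absurd rfl hne
  | cons x t ih =>
    intro d hk _
    have hx : x = (fn, x.2) := by
      have := hk x (by simp); exact Prod.ext this rfl
    rcases List.eq_nil_or_concat' t with ht | _
    · subst ht; rw [hx]; simp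
    case inr h =>
      have htne : t ≠ [] := by rcases h with ⟨_, _, rfl⟩; simp
      rw [List.foldl_cons, ih (pvUpd d x) (fun e he => hk e (by simp [he])) htne,
        hx, pv_upd_upd]
      simp

theorem pv_evA_empty_iff (fn lo hi) (s : List (Int × Int)) :
    (pvEvA fn lo hi s = []) ↔ pvAnyA lo hi s = false := by
  induction s with
  | nil => simp [pvEvA, pvAnyA]
  | cons a t ih =>
    by_cases h : lo ≤ a.1 ∧ a.1 ≤ hi <;> simp [pvEvA, h, pvAnyA_cons, ih]

theorem pv_evD_empty_iff (fn lo hi) (s : List (Int × Int)) :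
    (pvEvD fn lo hi s = []) ↔ pvAnyD lo hi s = false := by
  induction s with
  | nil => simp [pvEvD, pvAnyD]
  | cons a t ih =>
    by_cases h : min hi a.2 - max lo a.1 + 1 > 0 <;> simp [pvEvD, h, pvAnyD_cons, ih]

-- folding this function's event stream equals folding the single collapsed pair
theorem pv_collapse (fn : String) (lo hi : Int) (sa sd : List (Int × Int))
    (d : PySem.Dict String Int) :
    (pvEvA fn lo hi sa ++ pvEvD fn lo hi sd).foldl pvUpd d
      = (if pvHA lo hi 0 sa ≠ [] ∨ pvHD lo hi 0 sd ≠ []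
          then [(fn, ((pvHA lo hi 0 sa).map (·.2)).sum + ((pvHD lo hi 0 sd).map (·.2)).sum)]
          else []).foldl pvUpd d := by
  by_cases hA : pvAnyA lo hi sa = true <;> by_cases hD : pvAnyD lo hi sd = true
  · -- both sides hit
    have hne : pvEvA fn lo hi sa ++ pvEvD fn lo hi sd ≠ [] := by
      intro hx
      have := List.append_eq_nil_iff.mp hx
      rw [pv_evA_empty_iff] at this; simp [hA] at this
    have hha : pvHA lo hi 0 sa ≠ [] := by rw [Ne, pvHA_eq_nil]; simp [hA]
    rw [pv_fold_same_key fn _ d (by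
      intro e he; rcases List.mem_append.mp he with h | h
      exacts [pvEvA_keys fn lo hi sa e h, pvEvD_keys fn lo hi sd e h]) hne]
    simp only [hha, ne_eq, not_false_iff, true_or, if_pos]
    rw [List.foldl_cons, List.foldl_nil, List.map_append, List.sum_append,
      pvHA_snd fn, pvHD_snd fn]
  · -- only additions hit
    have hed : pvEvD fn lo hi sd = [] := by rw [pv_evD_empty_iff]; simpa using hD
    have hhd : pvHD lo hi 0 sd = [] := by rw [pvHD_eq_nil]; simpa using hD
    have hha : pvHA lo hi 0 sa ≠ [] := by rw [Ne, pvHA_eq_nil]; simp [hA]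
    have hne : pvEvA fn lo hi sa ≠ [] := by rw [Ne, pv_evA_empty_iff]; simp [hA]
    rw [hed, List.append_nil, pv_fold_same_key fn _ d (pvEvA_keys fn lo hi sa) hne]
    simp only [hha, ne_eq, not_false_iff, true_or, if_pos]
    rw [List.foldl_cons, List.foldl_nil, pvHA_snd fn]
    simp [hhd]
  · -- only deletions hit
    have hea : pvEvA fn lo hi sa = [] := by rw [pv_evA_empty_iff]; simpa using hA
    have hha : pvHA lo hi 0 sa = [] := by rw [pvHA_eq_nil]; simpa using hA
    have hhd : pvHD lo hi 0 sd ≠ [] := by rw [Ne, pvHD_eq_nil]; simp [hD]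
    have hne : pvEvD fn lo hi sd ≠ [] := by rw [Ne, pv_evD_empty_iff]; simp [hD]
    rw [hea, List.nil_append, pv_fold_same_key fn _ d (pvEvD_keys fn lo hi sd) hne]
    simp only [hhd, ne_eq, not_false_iff, or_true, if_pos]
    rw [List.foldl_cons, List.foldl_nil, pvHD_snd fn]
    simp [hha]
  · -- nothing hit
    have hea : pvEvA fn lo hi sa = [] := by rw [pv_evA_empty_iff]; simpa using hA
    have hha : pvHA lo hi 0 sa = [] := by rw [pvHA_eq_nil]; simpa using hA
    have hed : pvEvD fn lo hi sd = [] := by rw [pv_evD_empty_iff]; simpa using hD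
    have hhd : pvHD lo hi 0 sd = [] := by rw [pvHD_eq_nil]; simpa using hD
    simp [hea, hed, hha, hhd]

theorem pv_main (additions deletions : List (Int × Int)) :
    ∀ (pairs : List (String × (Int × Int))) (ap dp : Nat) (events : List (String × Int)),
      ap ≤ additions.length → dp ≤ deletions.length →
      (pairs.foldl (pvAStep additions deletions) (events.foldl pvUpd PySem.Dict.empty, ap, dp)).1
        = (pairs.foldl pvBStep (events, additions.drop ap, deletions.drop dp)).1.foldl pvUpd PySem.Dict.empty := by
  intro pairs
  induction pairs with
  | nil => intro ap dp events hap hdp; rfl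
  | cons p rest ih =>
    intro ap dp events hap hdp
    obtain ⟨fn, lo, hi⟩ := p
    have hcutA : pvCutA lo hi (additions.drop ap) ≤ (additions.drop ap).length := by
      unfold pvCutA; split_ifs with hany
      · have := pv_lastA_lt lo hi _ hany; omega
      · omega
    have hcutD : pvCutD lo hi (deletions.drop dp) ≤ (deletions.drop dp).length := by
      unfold pvCutD; split_ifs with hany
      · have := pv_lastD_lt lo hi _ hany; omega
      · omega
    have hlen1 : (additions.drop ap).length = additions.length - ap := by simp
    have hlen2 : (deletions.drop dp).length = deletions.length - dp := by simp
    have hA :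
        pvAStep additions deletions (events.foldl pvUpd PySem.Dict.empty, ap, dp) (fn, (lo, hi))
          = ((events ++ (pvEvA fn lo hi (additions.drop ap) ++ pvEvD fn lo hi (deletions.drop dp))).foldl
               pvUpd PySem.Dict.empty,
             ap + pvCutA lo hi (additions.drop ap), dp + pvCutD lo hi (deletions.drop dp)) := by
      simp only [pvAStep]
      rw [pv_A_add additions fn lo hi _ ap ap _ rfl hap,
          pv_A_del deletions fn lo hi _ dp dp _ rfl hdp]
      simp only [List.foldl_append, pvCutA, pvCutD]
      split_ifs <;> simp [Prod.ext_iff] <;> omega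
    have hBadds :
        (if pvHA lo hi 0 (additions.drop ap) ≠ []
          then (additions.drop ap).drop (((pvHA lo hi 0 (additions.drop ap)).getLastD (0, 0)).1 + 1)
          else additions.drop ap)
          = additions.drop (ap + pvCutA lo hi (additions.drop ap)) := by
      by_cases hany : pvAnyA lo hi (additions.drop ap) = true
      · have hne : pvHA lo hi 0 (additions.drop ap) ≠ [] := by
          rw [Ne, pvHA_eq_nil]; simp [hany]
        rw [if_pos hne, pvHA_last lo hi _ 0 hany, List.drop_drop]
        unfold pvCutA; rw [if_pos hany]
        congr 1; omega
      · have hnil : pvHA lo hi 0 (additions.drop ap) = [] := by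
          rw [pvHA_eq_nil]; simpa using hany
        have hc : pvCutA lo hi (additions.drop ap) = 0 := by
          unfold pvCutA; simp [hany]
        simp [hnil, hc]
    have hBdels :
        (if pvHD lo hi 0 (deletions.drop dp) ≠ []
          then (deletions.drop dp).drop ((pvHD lo hi 0 (deletions.drop dp)).getLastD (0, 0)).1
          else deletions.drop dp)
          = deletions.drop (dp + pvCutD lo hi (deletions.drop dp)) := by
      by_cases hany : pvAnyD lo hi (deletions.drop dp) = true
      · have hne : pvHD lo hi 0 (deletions.drop dp) ≠ [] := by
          rw [Ne, pvHD_eq_nil]; simp [hany]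
        rw [if_pos hne, pvHD_last lo hi _ 0 hany, List.drop_drop]
        unfold pvCutD; rw [if_pos hany]
        congr 1; omega
      · have hnil : pvHD lo hi 0 (deletions.drop dp) = [] := by
          rw [pvHD_eq_nil]; simpa using hany
        have hc : pvCutD lo hi (deletions.drop dp) = 0 := by
          unfold pvCutD; simp [hany]
        simp [hnil, hc]
    have hper :
        (if pvHA lo hi 0 (additions.drop ap) ≠ [] ∨ pvHD lo hi 0 (deletions.drop dp) ≠ []
          then events ++ [(fn, ((pvHA lo hi 0 (additions.drop ap)).map (·.2)).sum
                                + ((pvHD lo hi 0 (deletions.drop dp)).map (·.2)).sum)]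
          else events)
          = events ++ (if pvHA lo hi 0 (additions.drop ap) ≠ [] ∨ pvHD lo hi 0 (deletions.drop dp) ≠ []
              then [(fn, ((pvHA lo hi 0 (additions.drop ap)).map (·.2)).sum
                          + ((pvHD lo hi 0 (deletions.drop dp)).map (·.2)).sum)]
              else []) := by
      by_cases h : pvHA lo hi 0 (additions.drop ap) ≠ [] ∨ pvHD lo hi 0 (deletions.drop dp) ≠ [] <;>
        simp [h]
    have hB :
        pvBStep (events, additions.drop ap, deletions.drop dp) (fn, (lo, hi))
          = (events ++ (if pvHA lo hi 0 (additions.drop ap) ≠ [] ∨ pvHD lo hi 0 (deletions.drop dp) ≠ []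
               then [(fn, ((pvHA lo hi 0 (additions.drop ap)).map (·.2)).sum
                           + ((pvHD lo hi 0 (deletions.drop dp)).map (·.2)).sum)]
               else []),
             additions.drop (ap + pvCutA lo hi (additions.drop ap)),
             deletions.drop (dp + pvCutD lo hi (deletions.drop dp))) := by
      simp only [pvBStep, pv_hitsA_eq, pv_hitsD_eq]
      exact Prod.ext hper (Prod.ext hBadds hBdels)
    have hdict :
        (events ++ (pvEvA fn lo hi (additions.drop ap) ++ pvEvD fn lo hi (deletions.drop dp))).foldl
            pvUpd PySem.Dict.empty
          = (events ++ (if pvHA lo hi 0 (additions.drop ap) ≠ [] ∨ pvHD lo hi 0 (deletions.drop dp) ≠ []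
              then [(fn, ((pvHA lo hi 0 (additions.drop ap)).map (·.2)).sum
                          + ((pvHD lo hi 0 (deletions.drop dp)).map (·.2)).sum)]
              else [])).foldl pvUpd PySem.Dict.empty := by
      conv_lhs => rw [List.foldl_append]
      conv_rhs => rw [List.foldl_append]
      exact pv_collapse fn lo hi _ _ _
    simp only [List.foldl_cons]
    rw [hA, hdict, hB]
    exact ih (ap + pvCutA lo hi (additions.drop ap)) (dp + pvCutD lo hi (deletions.drop dp)) _
      (by omega) (by omega)

-- ===== VERDICT (by name: the statement is the Claim_ definition above) =====
theorem get_changed_functions_spec : Claim_equal_get_changed_functions := by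
  intro func_names func_ranges additions deletions _
  unfold Spec_get_changed_functions get_changed_functions get_changed_functions_alt
  have h := pv_main additions deletions (func_names.zip func_ranges) 0 0 []
    (Nat.zero_le _) (Nat.zero_le _)
  simp only [List.foldl_nil, List.drop_zero] at h
  simp only [pv_finalfold, h]
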